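-- pv_equiv track=rewrite | github.com/Ghostkey316/Ghostkey-Humanity-Mirror | src/loop_engine.py | _trait_evolution
-- ===== SOURCE A (Python) =====
-- from typing import Dict, List
--
-- def _trait_evolution(current: List[str], previous: List[str]) -> List[str]:
--     curr = set(current)
--     prev = set(previous)
--     notes: List[str] = []
--     for t in sorted(curr - prev):
--         notes.append(f"{t} emerged")
--     for t in sorted(prev - curr):
--         notes.append(f"{t} faded")
--     return notes
-- ===== SOURCE B (Python) =====
-- from typing import List
--
-- def _trait_evolution(current: List[str], previous: List[str]) -> List[str]:
--     # Merge-scan of the two sorted, deduplicated lists (no set differences).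
--     cs = sorted(set(current))
--     ps = sorted(set(previous))
--     i = j = 0
--     emerged: List[str] = []
--     faded: List[str] = []
--     while i < len(cs) and j < len(ps):
--         if cs[i] == ps[j]:
--             i += 1
--             j += 1
--         elif cs[i] < ps[j]:
--             emerged.append(f"{cs[i]} emerged")
--             i += 1
--         else:
--             faded.append(f"{ps[j]} faded")
--             j += 1
--     while i < len(cs):
--         emerged.append(f"{cs[i]} emerged")
--         i += 1
--     while j < len(ps):
--         faded.append(f"{ps[j]} faded")
--         j += 1
--     return emerged + faded
-- ===== Notes on version B (the rewrite author's own statement) =====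
-- stated objective: alternative
-- what changed: Replaces A's two set-difference computations each followed by its own sort with a two-pointer merge scan over the two sorted deduplicated lists that emits 'emerged'/'faded' entries as the pointers advance, never forming a set difference.
import Mathlib
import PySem

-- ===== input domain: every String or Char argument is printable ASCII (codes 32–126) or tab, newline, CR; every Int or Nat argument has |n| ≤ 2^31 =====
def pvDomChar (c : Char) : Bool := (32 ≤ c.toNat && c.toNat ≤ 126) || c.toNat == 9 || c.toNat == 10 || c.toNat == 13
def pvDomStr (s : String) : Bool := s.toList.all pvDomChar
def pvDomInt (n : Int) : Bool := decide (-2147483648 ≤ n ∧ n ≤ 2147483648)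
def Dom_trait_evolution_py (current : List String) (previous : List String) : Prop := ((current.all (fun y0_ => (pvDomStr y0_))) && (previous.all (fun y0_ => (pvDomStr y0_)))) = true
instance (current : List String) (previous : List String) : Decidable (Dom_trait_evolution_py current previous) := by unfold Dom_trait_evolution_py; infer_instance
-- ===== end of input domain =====

-- B replaces A's two set differences (each sorted separately) by a single two-pointer merge
-- scan over the two sorted deduplicated lists (alternative algorithm, same asymptotic cost).

-- ===== PORT A =====
def trait_evolution_py (current : List String) (previous : List String) : List String :=
  let curr : PySem.Set String := PySem.Set.ofList current
  let prev : PySem.Set String := PySem.Set.ofList previous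
  let notes : List String :=
    (PySem.List.sorted (PySem.Set.diff curr prev) (fun t => t) false).foldl
      (fun acc t => acc ++ [t ++ " emerged"]) []
  let notes :=
    (PySem.List.sorted (PySem.Set.diff prev curr) (fun t => t) false).foldl
      (fun acc t => acc ++ [t ++ " faded"]) notes
  notes

-- ===== PORT B =====
-- the two while loops of Source B: a two-pointer merge over the sorted deduplicated lists,
-- carrying the emerged/faded accumulators; the trailing loops are the one-sided cases.
def pvMergeLoop (cs ps emerged faded : List String) : List String × List String :=
  match cs, ps with
  | [], rest => (emerged, faded ++ rest.map (fun t => t ++ " faded"))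
  | rest, [] => (emerged ++ rest.map (fun t => t ++ " emerged"), faded)
  | c :: cs', p :: ps' =>
    if c = p then pvMergeLoop cs' ps' emerged faded
    else if c < p then pvMergeLoop cs' (p :: ps') (emerged ++ [c ++ " emerged"]) faded
    else pvMergeLoop (c :: cs') ps' emerged (faded ++ [p ++ " faded"])
termination_by cs.length + ps.length

def trait_evolution_py_alt (current : List String) (previous : List String) : List String :=
  let cs := PySem.List.sorted (PySem.Set.ofList current) (fun t => t) false
  let ps := PySem.List.sorted (PySem.Set.ofList previous) (fun t => t) false
  let r := pvMergeLoop cs ps [] []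
  r.1 ++ r.2

-- ===== PRECONDITION & SPEC =====
def Spec_trait_evolution_py (current : List String) (previous : List String) (out : List String) : Prop := out = trait_evolution_py_alt current previous
instance (current : List String) (previous : List String) (out : List String) : Decidable (Spec_trait_evolution_py current previous out) := by unfold Spec_trait_evolution_py; infer_instance

-- ===== CLAIM (what is proved, stated in full; the proofs are below) =====
def Claim_equal_trait_evolution_py : Prop := ∀ (current : List String) (previous : List String), Dom_trait_evolution_py current previous → Spec_trait_evolution_py current previous (trait_evolution_py current previous)

-- ===== LEMMAS AND PROOFS =====

-- A's append loop is a map.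
theorem pv_foldl_app_map (f : String → String) :
    ∀ (L : List String) (acc : List String),
      L.foldl (fun a t => a ++ [f t]) acc = acc ++ L.map f := by
  intro L
  induction L with
  | nil => intro acc; simp
  | cons x xs ih => intro acc; simp [List.foldl, ih]

-- The merge loop computes the two filtered maps (for strictly increasing inputs).
theorem pv_filter_decide (a : String) (l r : List String) (h : ∀ x ∈ l, a < x) :
    l.filter (fun x => !decide (x = a) && !decide (x ∈ r)) = l.filter (fun x => !decide (x ∈ r)) := by
  apply List.filter_congr
  intro x hx
  simp
  exact fun _ => Ne.symm (ne_of_lt (h x hx))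

theorem pvMergeLoop_spec :
    ∀ (cs ps e f : List String),
      cs.Pairwise (· < ·) → ps.Pairwise (· < ·) →
      pvMergeLoop cs ps e f =
        (e ++ (cs.filter (fun x => !ps.contains x)).map (fun t => t ++ " emerged"),
         f ++ (ps.filter (fun x => !cs.contains x)).map (fun t => t ++ " faded")) := by
  intro cs ps e f
  induction cs, ps, e, f using pvMergeLoop.induct with
  | case1 e f rest =>
    intro _ _
    simp [pvMergeLoop]
  | case2 e f rest hne =>
    intro _ _
    simp [pvMergeLoop]
  | case3 e f cs' p ps' ih =>
    intro hcs hps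
    rw [List.pairwise_cons] at hcs hps
    simp only [pvMergeLoop, ih hcs.2 hps.2]
    simp [pv_filter_decide p cs' ps' hcs.1, pv_filter_decide p ps' cs' hps.1]
  | case4 e f c cs' p ps' hne hlt ih =>
    intro hcs hps
    rw [List.pairwise_cons] at hcs
    have hps' := List.pairwise_cons.mp hps
    have hgt : ∀ x ∈ p :: ps', c < x := by
      intro x hx
      rcases List.mem_cons.mp hx with h | h
      · exact h ▸ hlt
      · exact hlt.trans (hps'.1 x h)
    have hcp : c ∉ p :: ps' := fun hm => lt_irrefl c (hgt c hm)
    have hcps : c ∉ ps' := fun hm => hcp (List.mem_cons_of_mem _ hm)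
    simp only [pvMergeLoop, if_neg hne, if_pos hlt, ih hcs.2 hps]
    simp [hne, hcps, pv_filter_decide c (p :: ps') cs' hgt]
  | case5 e f c cs' p ps' hne hnlt ih =>
    intro hcs hps
    rw [List.pairwise_cons] at hps
    have hcs' := List.pairwise_cons.mp hcs
    have hplt : p < c := by
      rcases lt_trichotomy c p with h | h | h
      · exact absurd h hnlt
      · exact absurd h hne
      · exact h
    have hgt : ∀ x ∈ c :: cs', p < x := by
      intro x hx
      rcases List.mem_cons.mp hx with h | h
      · exact h ▸ hplt
      · exact hplt.trans (hcs'.1 x h)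
    have hpc : p ∉ c :: cs' := fun hm => lt_irrefl p (hgt p hm)
    have hpcs : p ∉ cs' := fun hm => hpc (List.mem_cons_of_mem _ hm)
    simp only [pvMergeLoop, if_neg hne, if_neg hnlt, ih hcs hps.2]
    simp [Ne.symm hne, hpcs, pv_filter_decide p (c :: cs') ps' hgt]

-- Filtering the sorted deduplicated list of l by p is the sorted version of a Nodup D
-- whose members are exactly l's distinct members satisfying p.
theorem pv_filter_sorted (l D : List String) (p : String → Bool)
    (hD : D.Nodup)
    (hmem : ∀ x, x ∈ D ↔ x ∈ PySem.Set.ofList l ∧ p x = true) :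
    (PySem.List.sorted (PySem.Set.ofList l) (fun t => t) false).filter p
      = PySem.List.sorted D (fun t => t) false := by
  have hlt : (PySem.List.sorted (PySem.Set.ofList l) (fun t => t) false).Pairwise (· < ·) :=
    PySem.List.sorted_ofList_pairwise_lt (xs := l)
  have hperm : ((PySem.List.sorted (PySem.Set.ofList l) (fun t => t) false).filter p).Perm D := by
    have h1 := (PySem.List.sorted_perm (PySem.Set.ofList l) (fun t => t) false).filter p
    refine h1.trans ?_
    rw [List.perm_ext_iff_of_nodup ((PySem.Set.nodup_ofList l).filter p) hD]
    intro x
    simp only [List.mem_filter, hmem x]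
  exact (PySem.List.sorted_eq_of_perm_of_pairwise_lt D _ (fun t => t) hperm (hlt.filter p)).symm

-- membership characterisations feeding pv_filter_sorted
theorem pv_mem_diff_left (c pv : List String) (x : String) :
    x ∈ PySem.Set.diff (PySem.Set.ofList c) (PySem.Set.ofList pv)
      ↔ x ∈ PySem.Set.ofList c
        ∧ (!(PySem.List.sorted (PySem.Set.ofList pv) (fun t => t) false).contains x) = true := by
  simp only [PySem.Set.mem_diff, Bool.not_eq_true', List.contains_eq_mem,
    decide_eq_false_iff_not, PySem.List.mem_sorted]

-- ===== VERDICT (by name: the statement is the Claim_ definition above) =====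
theorem trait_evolution_py_spec : Claim_equal_trait_evolution_py := by
  intro current previous _
  unfold Spec_trait_evolution_py
  simp only [trait_evolution_py, trait_evolution_py_alt]
  rw [pv_foldl_app_map, pv_foldl_app_map,
      pvMergeLoop_spec _ _ _ _
        (PySem.List.sorted_ofList_pairwise_lt (xs := current))
        (PySem.List.sorted_ofList_pairwise_lt (xs := previous)),
      pv_filter_sorted current (PySem.Set.diff (PySem.Set.ofList current) (PySem.Set.ofList previous)) _
        (PySem.Set.nodup_diff _ _ (PySem.Set.nodup_ofList current))
        (pv_mem_diff_left current previous),
      pv_filter_sorted previous (PySem.Set.diff (PySem.Set.ofList previous) (PySem.Set.ofList current)) _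
        (PySem.Set.nodup_diff _ _ (PySem.Set.nodup_ofList previous))
        (pv_mem_diff_left previous current)]
  simp
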